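-- pv_equiv track=rewrite | github.com/DNA-and-Natural-Algorithms-Group/nuskell | nuskell/verifier/crn_bisimulation_equivalence.py | solve_contejean_devie
-- ===== SOURCE A (Python) =====
-- from builtins import map, zip, dict, range
--
-- def solve_contejean_devie(a):
--     """ Algorithm from Contejean & Devie 1994.
--
--     Find a non-negative and non-trivial integer solution x of the equation ax=0.
--     Return [] when there is no such solution.
--     """
--     q = len(a[0])
--
--     def multi(x, y):
--         s = 0
--         for i in range(len(x)):
--             s = s + x[i] * y[i]
--         return s
--
--     def sub(x):
--         s = []
--         for i in range(len(a)):
--             s.append(multi(a[i],x))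
--         return s
--
--     def Min(b,t):
--         if not b:
--             return True
--         else:
--             for i in range(len(b)):
--                 r = True;
--                 for j in range(q):
--                     r = r and (b[i][j] <= t[j])
--                 if r:
--                     return False
--             return True
--
--     e = []
--     for i in range(q):
--         e.append([])
--         for j in range(len(a)):
--             e[i].append(a[j][i])
--     p = []
--     frozen = []
--     for i in range(q):
--         p.append([1 if j == i else 0 for j in range(q)])
--         frozen.append([i == q-1 or j < i for j in range(q)])
--     zero = [0 for i in range(len(a))]
--     zero1 = [0 for i in range(q)]
--     b = []
--     while p:
--         t = p.pop()
--         if sub(t) == zero: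
--             if t[q-1] == 1:
--                 return t    # just get the first solution, not all solutions (unlike C&D 1994).
--             b.append(list(t))
--             frozen.pop()
--         else:
--             f = frozen.pop()
--             for i in range(q):
--                 if not f[i] and (multi(sub(t), e[i]) < 0):
--                     tmp = list(t)
--                     tmp[i] += 1
--                     if Min(b, tmp):
--                         if i == q-1:
--                             f[i] = True
--                         p.append(tmp)
--                         frozen.append(list(f))
--                     f[i] = True
--     return []
-- ===== SOURCE B (Python) =====
-- def solve_contejean_devie(a):
--     """ Algorithm from Contejean & Devie 1994.
--
--     Find a non-negative and non-trivial integer solution x of the equation ax=0.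
--     Return [] when there is no such solution.
--
--     Re-implementation: each stack node carries its residual a*t, updated
--     incrementally by one column addition per step instead of recomputing
--     sub(t) q+1 times per node.
--     """
--     q = len(a[0])
--     cols = [[row[i] for row in a] for i in range(q)]
--     b = []
--     stack = []
--     for i in range(q):
--         t = [0] * q
--         t[i] = 1
--         f = [i == q - 1 or j < i for j in range(q)]
--         stack.append((t, cols[i][:], f))
--     while stack:
--         t, s, f = stack.pop()
--         if all(v == 0 for v in s):
--             if t[q - 1] == 1:
--                 return t
--             b.append(t)
--         else:
--             for i in range(q):
--                 if not f[i] and sum(sj * cj for sj, cj in zip(s, cols[i])) < 0: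
--                     tmp = t[:]
--                     tmp[i] += 1
--                     if all(any(bi[j] > tmp[j] for j in range(q)) for bi in b):
--                         if i == q - 1:
--                             f[i] = True
--                         s2 = [sj + cj for sj, cj in zip(s, cols[i])]
--                         stack.append((tmp, s2, f[:]))
--                     f[i] = True
--     return []
-- ===== Notes on version B (the rewrite author's own statement) =====
-- stated objective: alternative
-- what changed: Each stack node carries its residual vector a·t, updated by a single column addition per extension, so B never recomputes sub(t) (A recomputes it up to q+1 times per node); column lists, the zero test and the minimality test are computed directly instead of via index loops. Intended as a constant-factor speedup (the probe read 4.27x at the largest size both finished, but could not confirm it at larger sizes where the exponential search times out), so no speed is claimed.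
import Mathlib
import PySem

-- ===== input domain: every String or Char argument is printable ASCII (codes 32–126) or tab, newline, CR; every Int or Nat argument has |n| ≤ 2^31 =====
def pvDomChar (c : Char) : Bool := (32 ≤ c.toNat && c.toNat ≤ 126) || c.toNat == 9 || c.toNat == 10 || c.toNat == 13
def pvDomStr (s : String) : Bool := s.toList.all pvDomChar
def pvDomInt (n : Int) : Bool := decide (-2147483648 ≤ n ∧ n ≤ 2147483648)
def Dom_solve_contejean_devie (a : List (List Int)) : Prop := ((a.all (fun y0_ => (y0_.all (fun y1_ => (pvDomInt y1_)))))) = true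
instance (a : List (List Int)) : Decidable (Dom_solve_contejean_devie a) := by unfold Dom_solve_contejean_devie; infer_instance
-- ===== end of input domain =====

-- B caches each node's residual a·t on the stack and updates it by one column addition,
-- instead of A's recomputation of sub(t) up to q+1 times per node.
-- Both loops' `while p:` is ported with a fuel counter (pvFuel) as a pure totality guard;
-- the equivalence is proved for every fuel value, so the guard favours neither port.
def pvFuel : Nat := 2 ^ 64

-- ===== PORT A =====
def pvMulti (x y : List Int) : Int :=
  (List.range x.length).foldl (fun s i => s + x.getD i 0 * y.getD i 0) 0

def pvSubA (a : List (List Int)) (x : List Int) : List Int :=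
  (List.range a.length).foldl (fun s i => s ++ [pvMulti (a.getD i []) x]) []

def pvMinRow (q : Nat) (bi t : List Int) : Bool :=
  (List.range q).foldl (fun r j => r && decide (bi.getD j 0 ≤ t.getD j 0)) true

def pvMinA (q : Nat) (t : List Int) : List (List Int) → Bool
  | [] => true
  | bi :: rest => if pvMinRow q bi t then false else pvMinA q t rest

-- e[i] built by A's nested append loops
def pvE (a : List (List Int)) (q : Nat) : List (List Int) :=
  (List.range q).foldl
    (fun e i => e ++ [(List.range a.length).foldl (fun s j => s ++ [(a.getD j []).getD i 0]) []]) []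

-- the body of A's `for i in range(q):` over mutable state (f, p, frozen)
def pvStepA (a e : List (List Int)) (q : Nat) (b : List (List Int)) (t : List Int)
    (st : List Bool × List (List Int) × List (List Bool)) (i : Nat) :
    List Bool × List (List Int) × List (List Bool) :=
  if !(st.1.getD i false) && decide (pvMulti (pvSubA a t) (e.getD i []) < 0) then
    let tmp := t.set i (t.getD i 0 + 1)
    if pvMinA q tmp b then
      ((st.1.set i true), tmp :: st.2.1, (if i = q - 1 then st.1.set i true else st.1) :: st.2.2)
    else ((st.1.set i true), st.2.1, st.2.2)
  else st

def pvLoopA (a e : List (List Int)) (q : Nat) :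
    Nat → List (List Int) → List (List Bool) → List (List Int) → List Int
  | 0, _, _, _ => []
  | _ + 1, [], _, _ => []
  | fuel + 1, t :: p, frozen, b =>
    if pvSubA a t = List.replicate a.length 0 then
      if t.getD (q - 1) 0 = 1 then t
      else pvLoopA a e q fuel p frozen.tail (b ++ [t])
    else
      let st := (List.range q).foldl (pvStepA a e q b t) (frozen.headD [], p, frozen.tail)
      pvLoopA a e q fuel st.2.1 st.2.2 b

def solve_contejean_devie (a : List (List Int)) : List Int :=
  let q := (a.headD []).length
  let e := pvE a q
  let p0 := (List.range q).foldl
    (fun acc i => ((List.range q).map (fun j => if j = i then (1 : Int) else 0)) :: acc) []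
  let fr0 := (List.range q).foldl
    (fun acc i => ((List.range q).map (fun j => decide (i = q - 1) || decide (j < i))) :: acc) []
  pvLoopA a e q pvFuel p0 fr0 []

-- ===== PORT B =====
def pvCols (a : List (List Int)) (q : Nat) : List (List Int) :=
  (List.range q).map (fun i => a.map (fun row => row.getD i 0))

def pvDotB (s c : List Int) : Int := (s.zip c).foldl (fun acc p => acc + p.1 * p.2) 0

def pvAllZero (s : List Int) : Bool := s.all (fun v => v == 0)

def pvMinB (q : Nat) (b : List (List Int)) (t : List Int) : Bool :=
  b.all (fun bi => (List.range q).any (fun j => decide (t.getD j 0 < bi.getD j 0)))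

-- the body of B's `for i in range(q):` over mutable state (f, stack)
def pvStepB (cols : List (List Int)) (q : Nat) (b : List (List Int)) (t s : List Int)
    (st : List Bool × List (List Int × List Int × List Bool)) (i : Nat) :
    List Bool × List (List Int × List Int × List Bool) :=
  if !(st.1.getD i false) && decide (pvDotB s (cols.getD i []) < 0) then
    let tmp := t.set i (t.getD i 0 + 1)
    if pvMinB q b tmp then
      ((st.1.set i true),
       (tmp, List.zipWith (· + ·) s (cols.getD i []),
        if i = q - 1 then st.1.set i true else st.1) :: st.2)
    else ((st.1.set i true), st.2)
  else st

def pvLoopB (cols : List (List Int)) (q : Nat) :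
    Nat → List (List Int × List Int × List Bool) → List (List Int) → List Int
  | 0, _, _ => []
  | _ + 1, [], _ => []
  | fuel + 1, (t, s, f) :: stack, b =>
    if pvAllZero s then
      if t.getD (q - 1) 0 = 1 then t
      else pvLoopB cols q fuel stack (b ++ [t])
    else
      let st := (List.range q).foldl (pvStepB cols q b t s) (f, stack)
      pvLoopB cols q fuel st.2 b

def solve_contejean_devie_alt (a : List (List Int)) : List Int :=
  let q := (a.headD []).length
  let cols := pvCols a q
  let stack0 := (List.range q).foldl
    (fun acc i =>
      ((List.replicate q (0 : Int)).set i 1,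
       cols.getD i [],
       (List.range q).map (fun j => decide (i = q - 1) || decide (j < i))) :: acc) []
  pvLoopB cols q pvFuel stack0 []

-- ===== PRECONDITION & SPEC =====
-- Pre_ excludes exactly the inputs where the Python A raises IndexError: the empty list
-- (a[0]) and ragged matrices with a nonempty first row (a[j][i] / t[j] out of range).
def Pre_solve_contejean_devie (a : List (List Int)) : Prop :=
  a ≠ [] ∧ ((a.headD []).length = 0 ∨ ∀ row ∈ a, row.length = (a.headD []).length)
instance (a : List (List Int)) : Decidable (Pre_solve_contejean_devie a) := by
  unfold Pre_solve_contejean_devie; infer_instance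

def pvWitness_solve_contejean_devie : List (List Int) := [[1, -1], [-2, 2]]

def Spec_solve_contejean_devie (a : List (List Int)) (out : List Int) : Prop := out = solve_contejean_devie_alt a
instance (a : List (List Int)) (out : List Int) : Decidable (Spec_solve_contejean_devie a out) := by unfold Spec_solve_contejean_devie; infer_instance

-- ===== CLAIM (what is proved, stated in full; the proofs are below) =====
def Claim_equal_solve_contejean_devie : Prop := ∀ (a : List (List Int)), Dom_solve_contejean_devie a → Pre_solve_contejean_devie a → Spec_solve_contejean_devie a (solve_contejean_devie a)


-- ===== LEMMAS AND PROOFS =====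

-- generic helpers
theorem pvh_map_range_getD {α β : Type} (l : List α) (d : α) (g : α → β) :
    (List.range l.length).map (fun i => g (l.getD i d)) = l.map g := by
  apply List.ext_getElem
  · simp
  · intro i h1 h2
    simp [List.getElem?_eq_getElem (by simpa using h1)]

theorem pvh_sum_set (l : List Int) (i : Nat) (x : Int) (h : i < l.length) :
    (l.set i x).sum = l.sum + x - l[i] := by
  rw [List.sum_set]
  simp [h]
  rw [← List.sum_take_add_sum_drop l i]
  have hd : (List.drop i l).sum = l[i] + (List.drop (i+1) l).sum := by
    conv_lhs => rw [List.drop_eq_getElem_cons h]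
    rw [List.sum_cons]
  rw [hd]; ring

theorem pvh_foldl_and (p : Nat → Bool) (l : List Nat) (acc : Bool) :
    l.foldl (fun r j => r && p j) acc = (acc && l.all p) := by
  induction l generalizing acc with
  | nil => simp
  | cons x xs ih => simp [ih, Bool.and_assoc]

theorem pvh_not_le (x y : Int) : (!decide (x ≤ y)) = decide (y < x) := by
  by_cases h : x ≤ y
  · simp [h, not_lt.mpr h]
  · simp [h, lt_of_not_ge h]

theorem pvh_foldl_cons_rev {α β : Type} (g : α → β) (l : List α) (acc : List β) :
    l.foldl (fun acc x => g x :: acc) acc = (l.map g).reverse ++ acc := by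
  induction l generalizing acc with
  | nil => simp
  | cons x xs ih => simp [ih]

-- sum forms of the two dot products
theorem pv_multi_sum (x y : List Int) :
    pvMulti x y = ((List.range x.length).map (fun i => x.getD i 0 * y.getD i 0)).sum := by
  unfold pvMulti
  rw [PySem.List.foldl_add]
  simp

theorem pv_dot_sum (x y : List Int) :
    pvDotB x y = ((x.zip y).map (fun p => p.1 * p.2)).sum := by
  unfold pvDotB
  rw [PySem.List.foldl_add]
  simp

theorem pv_sub_eq_map (a : List (List Int)) (x : List Int) :
    pvSubA a x = a.map (fun row => pvMulti row x) := by
  unfold pvSubA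
  rw [PySem.List.foldl_append_singleton_eq_map (fun i => pvMulti (a.getD i []) x)]
  simpa using pvh_map_range_getD a [] (fun row => pvMulti row x)

theorem pv_sub_length (a : List (List Int)) (x : List Int) :
    (pvSubA a x).length = a.length := by
  rw [pv_sub_eq_map]; simp

theorem pv_e_eq_cols (a : List (List Int)) (q : Nat) : pvE a q = pvCols a q := by
  unfold pvE pvCols
  rw [PySem.List.foldl_append_singleton_eq_map
    (fun i => (List.range a.length).foldl (fun s j => s ++ [(a.getD j []).getD i 0]) [])]
  simp only [List.nil_append]
  apply List.map_congr_left
  intro i _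
  rw [PySem.List.foldl_append_singleton_eq_map (fun j => (a.getD j []).getD i 0)]
  simpa using pvh_map_range_getD a [] (fun row => row.getD i 0)

theorem pv_cols_getD (a : List (List Int)) (q i : Nat) (hi : i < q) :
    (pvCols a q).getD i [] = a.map (fun row => row.getD i 0) := by
  unfold pvCols
  exact PySem.List.getD_map_range _ _ _ _ hi

theorem pv_multi_eq_dot (x y : List Int) (h : x.length ≤ y.length) :
    pvMulti x y = pvDotB x y := by
  rw [pv_multi_sum, pv_dot_sum]
  congr 1
  apply List.ext_getElem
  · simp; omega
  · intro i h1 h2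
    have hx : i < x.length := by simpa using h1
    have hy : i < y.length := lt_of_lt_of_le hx h
    simp [List.getD_eq_getElem, List.getElem_zip, hx, hy,
      List.getElem?_eq_getElem hx, List.getElem?_eq_getElem hy]

theorem pv_multi_set (row t : List Int) (q i : Nat) (hr : row.length = q)
    (ht : t.length = q) (hi : i < q) :
    pvMulti row (t.set i (t.getD i 0 + 1)) = pvMulti row t + row.getD i 0 := by
  rw [pv_multi_sum, pv_multi_sum]
  have hset : (List.range row.length).map (fun j => row.getD j 0 * (t.set i (t.getD i 0 + 1)).getD j 0)
      = ((List.range row.length).map (fun j => row.getD j 0 * t.getD j 0)).set i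
          (row.getD i 0 * (t.getD i 0 + 1)) := by
    apply List.ext_getElem
    · simp
    · intro j h1 h2
      have hj : j < row.length := by simpa using h1
      have hjt : j < t.length := by omega
      have hit : i < t.length := by omega
      simp [List.getElem?_eq_getElem hj, List.getElem_set, List.getD_eq_getElem,
        hjt, hit]
      by_cases hij : i = j
      · subst hij
        simp [List.getElem?_eq_getElem hj]
      · simp [hij]
  rw [hset]
  rw [pvh_sum_set _ _ _ (by simpa using (by omega : i < row.length))]
  have hi' : i < row.length := by omega
  simp [List.getElem?_eq_getElem hi', List.getD_eq_getElem]
  ring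

theorem pv_minrow_all (q : Nat) (bi t : List Int) :
    pvMinRow q bi t = (List.range q).all (fun j => decide (bi.getD j 0 ≤ t.getD j 0)) := by
  unfold pvMinRow
  simpa using pvh_foldl_and (fun j => decide (bi.getD j 0 ≤ t.getD j 0)) (List.range q) true

theorem pv_minrow_not (q : Nat) (bi t : List Int) :
    (!pvMinRow q bi t) = (List.range q).any (fun j => decide (t.getD j 0 < bi.getD j 0)) := by
  rw [pv_minrow_all, List.not_all_eq_any_not]
  congr 1
  funext j
  exact pvh_not_le _ _

theorem pv_min_eq (q : Nat) (b : List (List Int)) (t : List Int) :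
    pvMinA q t b = pvMinB q b t := by
  unfold pvMinB
  induction b with
  | nil => simp [pvMinA]
  | cons bi rest ih =>
    simp only [pvMinA, List.all_cons, ← pv_minrow_not, ih]
    by_cases h : pvMinRow q bi t <;> simp [h]

theorem pv_allzero_iff (s : List Int) (n : Nat) (h : s.length = n) :
    pvAllZero s = true ↔ s = List.replicate n 0 := by
  unfold pvAllZero
  rw [List.eq_replicate_iff]
  simp [h]

theorem pv_sub_set (a : List (List Int)) (q i : Nat) (t : List Int)
    (hq : ∀ row ∈ a, row.length = q) (ht : t.length = q) (hi : i < q) :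
    pvSubA a (t.set i (t.getD i 0 + 1))
      = List.zipWith (· + ·) (pvSubA a t) ((pvCols a q).getD i []) := by
  rw [pv_sub_eq_map, pv_sub_eq_map, pv_cols_getD a q i hi]
  have hz : List.zipWith (· + ·) (a.map (fun row => pvMulti row t)) (a.map (fun row => row.getD i 0))
      = a.map (fun row => pvMulti row t + row.getD i 0) := by
    simp [List.zipWith_map]
  rw [hz]
  apply List.map_congr_left
  intro row hrow
  exact pv_multi_set row t q i (hq row hrow) ht hi

theorem pv_step_corr (a : List (List Int)) (q : Nat) (hq : ∀ row ∈ a, row.length = q)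
    (b : List (List Int)) (t : List Int) (ht : t.length = q) (i : Nat) (hi : i < q)
    (f : List Bool) (p : List (List Int)) (frozen : List (List Bool))
    (hlen : p.length = frozen.length) (hp : ∀ u ∈ p, u.length = q) :
    pvStepB (pvCols a q) q b t (pvSubA a t)
        (f, List.zipWith (fun u g => (u, pvSubA a u, g)) p frozen) i
      = ((pvStepA a (pvCols a q) q b t (f, p, frozen) i).1,
         List.zipWith (fun u g => (u, pvSubA a u, g))
           (pvStepA a (pvCols a q) q b t (f, p, frozen) i).2.1
           (pvStepA a (pvCols a q) q b t (f, p, frozen) i).2.2)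
    ∧ (pvStepA a (pvCols a q) q b t (f, p, frozen) i).2.1.length
        = (pvStepA a (pvCols a q) q b t (f, p, frozen) i).2.2.length
    ∧ ∀ u ∈ (pvStepA a (pvCols a q) q b t (f, p, frozen) i).2.1, u.length = q := by
  have hclen : ((pvCols a q).getD i []).length = a.length := by
    rw [pv_cols_getD a q i hi]; simp
  have hc : pvDotB (pvSubA a t) ((pvCols a q).getD i [])
      = pvMulti (pvSubA a t) ((pvCols a q).getD i []) :=
    (pv_multi_eq_dot _ _ (by rw [pv_sub_length, hclen])).symm
  simp only [pvStepA, pvStepB, hc, pv_min_eq]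
  by_cases h1 : (!(f.getD i false) && decide (pvMulti (pvSubA a t) ((pvCols a q).getD i []) < 0)) = true
  · simp only [h1, if_true]
    by_cases h2 : pvMinB q b (t.set i (t.getD i 0 + 1)) = true
    · simp only [h2, if_true]
      refine ⟨?_, by simpa using hlen, ?_⟩
      · simp only [List.zipWith_cons_cons, ← pv_sub_set a q i t hq ht hi]
      · intro u hu
        rcases List.mem_cons.mp hu with h | h
        · subst h; simpa using ht
        · exact hp u h
    · simp only [h2, if_false]
      exact ⟨rfl, hlen, hp⟩
  · simp only [h1, if_false]
    exact ⟨rfl, hlen, hp⟩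

theorem pv_fold_corr (a : List (List Int)) (q : Nat) (hq : ∀ row ∈ a, row.length = q)
    (b : List (List Int)) (t : List Int) (ht : t.length = q) :
    ∀ (l : List Nat), (∀ i ∈ l, i < q) →
    ∀ (f : List Bool) (p : List (List Int)) (frozen : List (List Bool)),
      p.length = frozen.length → (∀ u ∈ p, u.length = q) →
      l.foldl (pvStepB (pvCols a q) q b t (pvSubA a t))
          (f, List.zipWith (fun u g => (u, pvSubA a u, g)) p frozen)
        = ((l.foldl (pvStepA a (pvCols a q) q b t) (f, p, frozen)).1,
           List.zipWith (fun u g => (u, pvSubA a u, g))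
             (l.foldl (pvStepA a (pvCols a q) q b t) (f, p, frozen)).2.1
             (l.foldl (pvStepA a (pvCols a q) q b t) (f, p, frozen)).2.2)
      ∧ (l.foldl (pvStepA a (pvCols a q) q b t) (f, p, frozen)).2.1.length
          = (l.foldl (pvStepA a (pvCols a q) q b t) (f, p, frozen)).2.2.length
      ∧ ∀ u ∈ (l.foldl (pvStepA a (pvCols a q) q b t) (f, p, frozen)).2.1, u.length = q := by
  intro l
  induction l with
  | nil =>
    intro _ f p frozen hlen hp
    exact ⟨rfl, hlen, hp⟩
  | cons i rest ih =>
    intro hmem f p frozen hlen hp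
    have hi : i < q := hmem i (List.mem_cons_self)
    obtain ⟨hstep, hslen, hsp⟩ := pv_step_corr a q hq b t ht i hi f p frozen hlen hp
    simp only [List.foldl_cons, hstep]
    exact ih (fun j hj => hmem j (List.mem_cons_of_mem _ hj))
      (pvStepA a (pvCols a q) q b t (f, p, frozen) i).1
      (pvStepA a (pvCols a q) q b t (f, p, frozen) i).2.1
      (pvStepA a (pvCols a q) q b t (f, p, frozen) i).2.2 hslen hsp

theorem pv_loop_corr (a : List (List Int)) (q : Nat) (hq : ∀ row ∈ a, row.length = q) :
    ∀ (fuel : Nat) (p : List (List Int)) (frozen : List (List Bool)) (b : List (List Int)),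
      p.length = frozen.length → (∀ u ∈ p, u.length = q) →
      pvLoopB (pvCols a q) q fuel (List.zipWith (fun u g => (u, pvSubA a u, g)) p frozen) b
        = pvLoopA a (pvCols a q) q fuel p frozen b := by
  intro fuel
  induction fuel with
  | zero => intro p frozen b _ _; rfl
  | succ n ih =>
    intro p frozen b hlen hp
    match p, frozen, hlen with
    | [], frozen, _ => rfl
    | t :: p', f :: fr', hlen =>
      have ht : t.length = q := hp t List.mem_cons_self
      have hp' : ∀ u ∈ p', u.length = q := fun u hu => hp u (List.mem_cons_of_mem _ hu)
      have hlen' : p'.length = fr'.length := by simpa using hlen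
      simp only [List.zipWith_cons_cons, pvLoopA, pvLoopB]
      have hz : (pvAllZero (pvSubA a t) = true) ↔ (pvSubA a t = List.replicate a.length 0) :=
        pv_allzero_iff _ _ (pv_sub_length a t)
      by_cases h0 : pvSubA a t = List.replicate a.length 0
      · rw [if_pos (hz.mpr h0), if_pos h0]
        by_cases h1 : t.getD (q - 1) 0 = 1
        · rw [if_pos h1, if_pos h1]
        · rw [if_neg h1, if_neg h1]
          simpa using ih p' fr' (b ++ [t]) hlen' hp'
      · rw [if_neg (fun hc => h0 (hz.mp hc)), if_neg h0]
        simp only [List.headD_cons, List.tail_cons]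
        obtain ⟨hstep, hslen, hsp⟩ := pv_fold_corr a q hq b t ht (List.range q)
          (fun i hi => List.mem_range.mp hi) f p' fr' hlen' hp'
        rw [hstep]
        exact ih _ _ b hslen hsp

theorem pv_basis_eq (q i : Nat) (hi : i < q) :
    (List.replicate q (0 : Int)).set i 1
      = (List.range q).map (fun j => if j = i then (1 : Int) else 0) := by
  apply List.ext_getElem
  · simp
  · intro j h1 h2
    have hj : j < q := by simpa using h1
    simp [List.getElem_set, List.getElem?_eq_getElem, hj]
    by_cases hij : i = j <;> simp [hij, eq_comm]

theorem pv_multi_zero (row : List Int) (q : Nat) (hr : row.length = q) :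
    pvMulti row (List.replicate q (0 : Int)) = 0 := by
  rw [pv_multi_sum]
  apply List.sum_eq_zero
  intro x hx
  obtain ⟨j, hj, hx⟩ := List.mem_map.mp hx
  have hjq : j < q := by rw [← hr]; simpa using List.mem_range.mp hj
  rw [← hx]
  simp [List.getD_eq_getElem, hjq]

theorem pv_multi_basis (row : List Int) (q i : Nat) (hr : row.length = q) (hi : i < q) :
    pvMulti row ((List.replicate q (0 : Int)).set i 1) = row.getD i 0 := by
  have h0 : (List.replicate q (0 : Int)).getD i 0 = 0 := by
    simp [List.getD_eq_getElem, hi]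
  have := pv_multi_set row (List.replicate q (0 : Int)) q i hr (by simp) hi
  rw [h0] at this
  norm_num at this
  rw [this, pv_multi_zero row q hr]
  simp [List.getD]

theorem pv_sub_basis (a : List (List Int)) (q i : Nat) (hq : ∀ row ∈ a, row.length = q)
    (hi : i < q) :
    pvSubA a ((List.replicate q (0 : Int)).set i 1) = (pvCols a q).getD i [] := by
  rw [pv_sub_eq_map, pv_cols_getD a q i hi]
  apply List.map_congr_left
  intro row hrow
  exact pv_multi_basis row q i (hq row hrow) hi

theorem pv_loopA_nil (a e : List (List Int)) (q fuel : Nat) (fr : List (List Bool))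
    (b : List (List Int)) : pvLoopA a e q fuel [] fr b = [] := by
  cases fuel <;> rfl

theorem pv_loopB_nil (cols : List (List Int)) (q fuel : Nat) (b : List (List Int)) :
    pvLoopB cols q fuel [] b = [] := by
  cases fuel <;> rfl

-- ===== VERDICT (by name: the statement is the Claim_ definition above) =====
theorem solve_contejean_devie_spec : Claim_equal_solve_contejean_devie := by
  intro a _ hpre
  unfold Spec_solve_contejean_devie
  obtain ⟨hne, hrows⟩ := hpre
  rcases hrows with h0 | hrows
  · -- first row empty: q = 0, both stacks are empty and both loops return []
    simp only [solve_contejean_devie, solve_contejean_devie_alt]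
    rw [h0]
    simp only [List.range_zero, List.foldl_nil]
    rw [pv_loopA_nil, pv_loopB_nil]
  · -- rectangular matrix: full loop correspondence
    simp only [solve_contejean_devie, solve_contejean_devie_alt]
    rw [pv_e_eq_cols]
    rw [pvh_foldl_cons_rev (fun i => (List.range (a.headD []).length).map
         (fun j => if j = i then (1 : Int) else 0)) (List.range (a.headD []).length) []]
    rw [pvh_foldl_cons_rev (fun i => (List.range (a.headD []).length).map
         (fun j => decide (i = (a.headD []).length - 1) || decide (j < i)))
         (List.range (a.headD []).length) []]
    rw [pvh_foldl_cons_rev (fun i => ((List.replicate (a.headD []).length (0 : Int)).set i 1,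
         (pvCols a (a.headD []).length).getD i [],
         (List.range (a.headD []).length).map
           (fun j => decide (i = (a.headD []).length - 1) || decide (j < i))))
         (List.range (a.headD []).length) []]
    set q := (a.headD []).length with hqdef
    set g1 := fun i => (List.range q).map (fun j => if j = i then (1 : Int) else 0) with hg1
    set g2 := fun i => (List.range q).map
      (fun j => decide (i = q - 1) || decide (j < i)) with hg2
    have hstack : ((List.range q).map (fun i => ((List.replicate q (0 : Int)).set i 1,
          (pvCols a q).getD i [], g2 i))).reverse ++ []
        = List.zipWith (fun u g => (u, pvSubA a u, g))
            (((List.range q).map g1).reverse ++ []) (((List.range q).map g2).reverse ++ []) := by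
      simp only [List.append_nil]
      rw [← List.reverse_zipWith (by simp)]
      congr 1
      rw [List.zipWith_map, List.zipWith_self]
      apply List.map_congr_left
      intro i hi
      have hiq : i < q := List.mem_range.mp hi
      have hg1i : g1 i = (List.replicate q (0 : Int)).set i 1 := (pv_basis_eq q i hiq).symm
      rw [hg1i, pv_sub_basis a q i hrows hiq]
    rw [hstack]
    refine (pv_loop_corr a q hrows pvFuel _ _ [] ?_ ?_).symm
    · simp
    · intro u hu
      simp only [List.append_nil, List.mem_reverse, List.mem_map] at hu
      obtain ⟨i, _, hu⟩ := hu
      rw [← hu, hg1]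
      simp
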